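-- pv_equiv track=rewrite | github.com/t-montes/202010-Introduccion | Expoandes/Aplicación - Cov-Info Bogotá/src/covinfobogota_module.py | cases_per_age_range
-- ===== SOURCE A (Python) =====
-- def cases_per_age_range(cases: list) -> dict:
--     key = 'edad'
--     c_par = {'0 a 9':[], '10 a 19':[], '20 a 29':[], '30 a 39':[], '40 a 49':[], '50 a 59':[],
--              '60 a 69':[], '70 a 79':[], '80 a 89':[], '90 a 99':[], '100 o mas':[]}
--     for i in cases:
--         if i[key] < 10:
--             c_par['0 a 9'].append(i)
--         elif i[key] < 20:
--             c_par['10 a 19'].append(i)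
--         elif i[key] < 30:
--             c_par['20 a 29'].append(i)
--         elif i[key] < 40:
--             c_par['30 a 39'].append(i)
--         elif i[key] < 50:
--             c_par['40 a 49'].append(i)
--         elif i[key] < 60:
--             c_par['50 a 59'].append(i)
--         elif i[key] < 70:
--             c_par['60 a 69'].append(i)
--         elif i[key] < 80:
--             c_par['70 a 79'].append(i)
--         elif i[key] < 90:
--             c_par['80 a 89'].append(i)
--         elif i[key] < 100:
--             c_par['90 a 99'].append(i)
--         else:
--             c_par['100 o mas'].append(i)
--
--     return c_par
-- ===== SOURCE B (Python) =====
-- def cases_per_age_range(cases: list) -> dict: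
--     labels = ['0 a 9', '10 a 19', '20 a 29', '30 a 39', '40 a 49', '50 a 59',
--               '60 a 69', '70 a 79', '80 a 89', '90 a 99', '100 o mas']
--     def in_bucket(k, e):
--         return (k == 0 or e >= 10 * k) and (k == 10 or e < 10 * (k + 1))
--     return {labels[k]: [c for c in cases if in_bucket(k, c['edad'])] for k in range(11)}
-- ===== Notes on version B (the rewrite author's own statement) =====
-- stated objective: alternative
-- what changed: Instead of one pass that dispatches each case through an 11-way if/elif chain into mutable bucket lists, B makes one filtering pass per decade range: a dict comprehension maps each label to the sublist of cases whose age satisfies that range's bounds.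
import Mathlib
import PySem

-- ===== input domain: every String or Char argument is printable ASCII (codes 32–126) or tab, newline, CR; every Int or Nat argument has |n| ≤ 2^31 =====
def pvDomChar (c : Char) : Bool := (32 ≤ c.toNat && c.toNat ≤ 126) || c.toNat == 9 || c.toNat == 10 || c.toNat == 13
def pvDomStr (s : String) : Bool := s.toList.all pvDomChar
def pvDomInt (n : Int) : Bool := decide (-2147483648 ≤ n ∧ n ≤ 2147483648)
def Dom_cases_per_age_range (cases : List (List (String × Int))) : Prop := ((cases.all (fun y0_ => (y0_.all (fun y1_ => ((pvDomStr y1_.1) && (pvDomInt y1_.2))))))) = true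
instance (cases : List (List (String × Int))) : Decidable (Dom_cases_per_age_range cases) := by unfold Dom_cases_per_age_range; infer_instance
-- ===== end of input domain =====

-- B builds each of the 11 decade buckets by a separate filtering pass (dict comprehension over the label table)
-- instead of A's single pass dispatching through an 11-way if/elif chain (objective: alternative; not faster).


-- ===== PORT A =====
-- i['edad'] is ported as (Dict.mk i).getD "edad" 0: exact whenever the key is present (Pre_ below excludes the KeyError inputs)
def cases_per_age_range (cases : List (List (String × Int))) : List (String × List (List (String × Int))) :=
  (cases.foldl (fun d i =>
      let age := (PySem.Dict.mk i).getD "edad" 0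
      if age < 10 then d.modify "0 a 9" [] (· ++ [i])
      else if age < 20 then d.modify "10 a 19" [] (· ++ [i])
      else if age < 30 then d.modify "20 a 29" [] (· ++ [i])
      else if age < 40 then d.modify "30 a 39" [] (· ++ [i])
      else if age < 50 then d.modify "40 a 49" [] (· ++ [i])
      else if age < 60 then d.modify "50 a 59" [] (· ++ [i])
      else if age < 70 then d.modify "60 a 69" [] (· ++ [i])
      else if age < 80 then d.modify "70 a 79" [] (· ++ [i])
      else if age < 90 then d.modify "80 a 89" [] (· ++ [i])
      else if age < 100 then d.modify "90 a 99" [] (· ++ [i])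
      else d.modify "100 o mas" [] (· ++ [i]))
    (PySem.Dict.ofList [("0 a 9", []), ("10 a 19", []), ("20 a 29", []), ("30 a 39", []),
      ("40 a 49", []), ("50 a 59", []), ("60 a 69", []), ("70 a 79", []), ("80 a 89", []),
      ("90 a 99", []), ("100 o mas", [])])).items

-- ===== PORT B =====
def pvLabels : List String :=
  ["0 a 9", "10 a 19", "20 a 29", "30 a 39", "40 a 49", "50 a 59",
   "60 a 69", "70 a 79", "80 a 89", "90 a 99", "100 o mas"]

-- Source B's in_bucket(k, e)
def pvInBucket (k : Int) (e : Int) : Bool :=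
  (k == 0 || decide (10 * k ≤ e)) && (k == 10 || decide (e < 10 * (k + 1)))

-- Source B's dict comprehension over range(11): the 11 labels are distinct, so the resulting
-- dict's items are exactly this list of pairs in range order.
def cases_per_age_range_alt (cases : List (List (String × Int))) : List (String × List (List (String × Int))) :=
  (PySem.List.pyRange 0 11 1).map (fun k =>
    (pvLabels.getD k.toNat "",
     cases.filter (fun i => pvInBucket k ((PySem.Dict.mk i).getD "edad" 0))))

-- ===== PRECONDITION & SPEC =====
-- A raises KeyError (and so does B) when a case lacks the key 'edad'; those inputs are excluded.
def Pre_cases_per_age_range (cases : List (List (String × Int))) : Prop :=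
  (cases.all (fun i => (PySem.Dict.mk i).contains "edad")) = true
instance (cases : List (List (String × Int))) : Decidable (Pre_cases_per_age_range cases) := by unfold Pre_cases_per_age_range; infer_instance
def pvWitness_cases_per_age_range : (List (List (String × Int))) := [[("edad", 5)], [("edad", 104)]]

def Spec_cases_per_age_range (cases : List (List (String × Int))) (out : List (String × List (List (String × Int)))) : Prop := out = cases_per_age_range_alt cases
instance (cases : List (List (String × Int))) (out : List (String × List (List (String × Int)))) : Decidable (Spec_cases_per_age_range cases out) := by unfold Spec_cases_per_age_range; infer_instance

-- ===== CLAIM =====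
def Claim_equal_cases_per_age_range : Prop := ∀ (cases : List (List (String × Int))), Dom_cases_per_age_range cases → Pre_cases_per_age_range cases → Spec_cases_per_age_range cases (cases_per_age_range cases)

-- ===== LEMMAS AND PROOFS =====

-- The label A's if/elif chain selects for a given age.
def pvChainLabel (age : Int) : String :=
  if age < 10 then "0 a 9"
  else if age < 20 then "10 a 19"
  else if age < 30 then "20 a 29"
  else if age < 40 then "30 a 39"
  else if age < 50 then "40 a 49"
  else if age < 60 then "50 a 59"
  else if age < 70 then "60 a 69"
  else if age < 80 then "70 a 79"
  else if age < 90 then "80 a 89"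
  else if age < 100 then "90 a 99"
  else "100 o mas"

def pvAge (i : List (String × Int)) : Int := (PySem.Dict.mk i).getD "edad" 0

-- A's loop body, as 'modify at the chain-selected key'.
set_option maxHeartbeats 1000000 in
theorem pv_stepA_eq :
    (fun (d : PySem.Dict String (List (List (String × Int)))) (i : List (String × Int)) =>
      let age := (PySem.Dict.mk i).getD "edad" 0
      if age < 10 then d.modify "0 a 9" [] (· ++ [i])
      else if age < 20 then d.modify "10 a 19" [] (· ++ [i])
      else if age < 30 then d.modify "20 a 29" [] (· ++ [i])
      else if age < 40 then d.modify "30 a 39" [] (· ++ [i])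
      else if age < 50 then d.modify "40 a 49" [] (· ++ [i])
      else if age < 60 then d.modify "50 a 59" [] (· ++ [i])
      else if age < 70 then d.modify "60 a 69" [] (· ++ [i])
      else if age < 80 then d.modify "70 a 79" [] (· ++ [i])
      else if age < 90 then d.modify "80 a 89" [] (· ++ [i])
      else if age < 100 then d.modify "90 a 99" [] (· ++ [i])
      else d.modify "100 o mas" [] (· ++ [i]))
    = (fun d i => d.modify (pvChainLabel (pvAge i)) [] (· ++ [i])) := by
  funext d i
  dsimp only []
  unfold pvChainLabel pvAge
  split_ifs <;> rfl

theorem pv_chainLabel_mem (age : Int) : pvChainLabel age ∈ pvLabels := by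
  unfold pvChainLabel pvLabels
  split_ifs <;> simp

-- getD of a grouping loop keyed by a function: the bucket at c is the old bucket plus the matching elements.
theorem pv_getD_foldl_modify_key_append {α : Type} (l : List α) (key : α → String)
    (d : PySem.Dict String (List α)) (c : String) :
    (l.foldl (fun d x => d.modify (key x) [] (· ++ [x])) d).getD c []
      = d.getD c [] ++ l.filter (fun x => key x == c) := by
  induction l generalizing d with
  | nil => simp
  | cons x xs ih =>
    simp only [List.foldl_cons, List.filter_cons, ih]
    rw [PySem.Dict.getD_modify]
    by_cases h : c = key x
    · subst h; simp
    · have : (key x == c) = false := by simp [Ne.symm h]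
      simp [h, this]

theorem pv_final_keys (cases : List (List (String × Int))) :
    (cases.foldl (fun d i => d.modify (pvChainLabel (pvAge i)) [] (· ++ [i]))
      (PySem.Dict.ofList (pvLabels.map (fun lab => (lab, []))))).keys = pvLabels := by
  rw [PySem.Dict.keys_foldl_modify_key]
  have hk : (PySem.Dict.ofList (pvLabels.map (fun lab => (lab, ([] : List (List (String × Int))))))).keys = pvLabels := by decide
  rw [hk, PySem.Set.update_eq_append_filter]
  have : (PySem.Set.ofList (cases.map (fun i => pvChainLabel (pvAge i)))).filter
      (fun y => !(PySem.Set.contains pvLabels y)) = [] := by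
    rw [List.filter_eq_nil_iff]
    intro y hy
    have hy' : y ∈ cases.map (fun i => pvChainLabel (pvAge i)) := by
      exact (PySem.Set.mem_ofList _ _).mp hy
    obtain ⟨i, _, rfl⟩ := List.mem_map.mp hy'
    simp only [Bool.not_eq_eq_eq_not, Bool.not_true, ← Bool.not_eq_true, not_not,
      PySem.Set.contains_eq_listContains, List.contains_iff_mem]
    exact pv_chainLabel_mem (pvAge i)
  rw [this, List.append_nil]

-- The initial dict maps every key to [].
set_option maxHeartbeats 2000000 in
theorem pv_init_getD (c : String) :
    (PySem.Dict.ofList (pvLabels.map (fun lab => (lab, ([] : List (List (String × Int))))))).getD c [] = [] := by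
  rw [PySem.Dict.getD_eq_get?_getD]
  simp only [pvLabels, List.map_cons, List.map_nil, PySem.Dict.ofList]
  rw [show (PySem.Dict.update PySem.Dict.empty
      [("0 a 9", ([] : List (List (String × Int)))), ("10 a 19", []), ("20 a 29", []), ("30 a 39", []),
       ("40 a 49", []), ("50 a 59", []), ("60 a 69", []), ("70 a 79", []), ("80 a 89", []),
       ("90 a 99", []), ("100 o mas", [])])
    = PySem.Dict.mk [("0 a 9", []), ("10 a 19", []), ("20 a 29", []), ("30 a 39", []),
       ("40 a 49", []), ("50 a 59", []), ("60 a 69", []), ("70 a 79", []), ("80 a 89", []),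
       ("90 a 99", []), ("100 o mas", [])] from rfl]
  simp only [PySem.Dict.get?_mk_cons]
  split_ifs <;> rfl

-- A's result, characterised: each label paired with the cases whose chain label is that label.
theorem pv_A_eq (cases : List (List (String × Int))) :
    cases_per_age_range cases
      = pvLabels.map (fun lab => (lab, cases.filter (fun i => pvChainLabel (pvAge i) == lab))) := by
  show (cases.foldl (fun d i =>
      let age := (PySem.Dict.mk i).getD "edad" 0
      if age < 10 then d.modify "0 a 9" [] (· ++ [i])
      else if age < 20 then d.modify "10 a 19" [] (· ++ [i])
      else if age < 30 then d.modify "20 a 29" [] (· ++ [i])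
      else if age < 40 then d.modify "30 a 39" [] (· ++ [i])
      else if age < 50 then d.modify "40 a 49" [] (· ++ [i])
      else if age < 60 then d.modify "50 a 59" [] (· ++ [i])
      else if age < 70 then d.modify "60 a 69" [] (· ++ [i])
      else if age < 80 then d.modify "70 a 79" [] (· ++ [i])
      else if age < 90 then d.modify "80 a 89" [] (· ++ [i])
      else if age < 100 then d.modify "90 a 99" [] (· ++ [i])
      else d.modify "100 o mas" [] (· ++ [i]))
    (PySem.Dict.ofList (pvLabels.map (fun lab => (lab, []))))).items = _
  rw [pv_stepA_eq]
  have hnd : (cases.foldl (fun d i => d.modify (pvChainLabel (pvAge i)) [] (· ++ [i]))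
      (PySem.Dict.ofList (pvLabels.map (fun lab => (lab, []))))).keys.Nodup := by
    exact PySem.Dict.nodup_keys_foldl_modify_key cases (fun i => pvChainLabel (pvAge i)) [] _ _ (by decide)
  rw [PySem.Dict.items_eq_map_keys _ hnd ([] : List (List (String × Int))), pv_final_keys]
  refine List.map_congr_left (fun lab _ => ?_)
  rw [pv_getD_foldl_modify_key_append, pv_init_getD, List.nil_append]

-- A's chain label is the table entry at the clamped index min(max(e//10,0),10).
theorem pv_label_eq (age : Int) :
    pvChainLabel age
      = pvLabels.getD (min (max (PySem.Int.floordiv age 10) 0) 10).toNat "" := by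
  have hq : (PySem.Int.floordiv age 10) * 10 ≤ age ∧ age < (PySem.Int.floordiv age 10 + 1) * 10 :=
    (PySem.Int.floordiv_eq_iff_of_pos (by norm_num)).mp rfl
  unfold pvChainLabel
  set q : Int := PySem.Int.floordiv age 10 with hqdef
  split_ifs with h1 h2 h3 h4 h5 h6 h7 h8 h9 h10 <;>
    [ (have : (min (max q 0) 10).toNat = 0 := by omega);
      (have : (min (max q 0) 10).toNat = 1 := by omega);
      (have : (min (max q 0) 10).toNat = 2 := by omega);
      (have : (min (max q 0) 10).toNat = 3 := by omega);
      (have : (min (max q 0) 10).toNat = 4 := by omega);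
      (have : (min (max q 0) 10).toNat = 5 := by omega);
      (have : (min (max q 0) 10).toNat = 6 := by omega);
      (have : (min (max q 0) 10).toNat = 7 := by omega);
      (have : (min (max q 0) 10).toNat = 8 := by omega);
      (have : (min (max q 0) 10).toNat = 9 := by omega);
      (have : (min (max q 0) 10).toNat = 10 := by omega)] <;>
    rw [this] <;> rfl

-- The 11 labels are pairwise distinct (as a table fact).
theorem pv_labels_inj (a b : Nat) (ha : a < 11) (hb : b < 11) :
    (pvLabels.getD a "" == pvLabels.getD b "") = (a == b) := by
  interval_cases a <;> interval_cases b <;> rfl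

-- Chain label vs. Source B's bucket bounds, for each admissible index.
theorem pv_bucket_eq (k : Int) (e : Int) (h0 : 0 ≤ k) (h10 : k ≤ 10) :
    (pvChainLabel e == pvLabels.getD k.toNat "") = pvInBucket k e := by
  rw [pv_label_eq e]
  have hq : (PySem.Int.floordiv e 10) * 10 ≤ e ∧ e < (PySem.Int.floordiv e 10 + 1) * 10 :=
    (PySem.Int.floordiv_eq_iff_of_pos (by norm_num)).mp rfl
  set q : Int := PySem.Int.floordiv e 10 with hqdef
  rw [pv_labels_inj _ _ (by omega) (by omega)]
  rw [Bool.eq_iff_iff]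
  simp only [pvInBucket, beq_iff_eq, Bool.and_eq_true, Bool.or_eq_true, decide_eq_true_eq]
  omega

-- ===== VERDICT =====
set_option maxHeartbeats 1000000 in
theorem cases_per_age_range_spec : Claim_equal_cases_per_age_range := by
  intro cases _ _
  show cases_per_age_range cases = cases_per_age_range_alt cases
  rw [pv_A_eq]
  unfold cases_per_age_range_alt
  rw [show PySem.List.pyRange 0 11 1 = [0, 1, 2, 3, 4, 5, 6, 7, 8, 9, 10] from by decide]
  simp only [pvLabels, List.map_cons, List.map_nil]
  refine congrArg₂ List.cons ?_ (congrArg₂ List.cons ?_ (congrArg₂ List.cons ?_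
    (congrArg₂ List.cons ?_ (congrArg₂ List.cons ?_ (congrArg₂ List.cons ?_
    (congrArg₂ List.cons ?_ (congrArg₂ List.cons ?_ (congrArg₂ List.cons ?_
    (congrArg₂ List.cons ?_ (congrArg₂ List.cons ?_ rfl)))))))))) <;>
  refine congrArg (Prod.mk _) (List.filter_congr (fun i _ => ?_)) <;>
  first
    | exact pv_bucket_eq 0 (pvAge i) (by norm_num) (by norm_num)
    | exact pv_bucket_eq 1 (pvAge i) (by norm_num) (by norm_num)
    | exact pv_bucket_eq 2 (pvAge i) (by norm_num) (by norm_num)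
    | exact pv_bucket_eq 3 (pvAge i) (by norm_num) (by norm_num)
    | exact pv_bucket_eq 4 (pvAge i) (by norm_num) (by norm_num)
    | exact pv_bucket_eq 5 (pvAge i) (by norm_num) (by norm_num)
    | exact pv_bucket_eq 6 (pvAge i) (by norm_num) (by norm_num)
    | exact pv_bucket_eq 7 (pvAge i) (by norm_num) (by norm_num)
    | exact pv_bucket_eq 8 (pvAge i) (by norm_num) (by norm_num)
    | exact pv_bucket_eq 9 (pvAge i) (by norm_num) (by norm_num)
    | exact pv_bucket_eq 10 (pvAge i) (by norm_num) (by norm_num)
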